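-- pv_equiv track=rewrite | github.com/carloseomartinsdev/GOT-Grafos | src/identificar_duplicados.py | mesclar
-- ===== SOURCE A (Python) =====
-- def mesclar(lista1, lista2):
--     mapa = {}
--     for item in lista1 + lista2:
--         chave = item['nome'].strip().upper()
--         if chave not in mapa:
--             mapa[chave] = item
--         else:
--             vars_existentes = {v.strip() for v in mapa[chave]['variacoes'].split(',') if v.strip()}
--             vars_novas = {v.strip() for v in item['variacoes'].split(',') if v.strip()}
--             mapa[chave]['variacoes'] = ', '.join(sorted(vars_existentes | vars_novas))
--     return list(mapa.values())
-- ===== SOURCE B (Python) =====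
-- def _colapsar(grupo):
--     primeiro = grupo[0]
--     if len(grupo) > 1:
--         variacoes = set()
--         for it in grupo:
--             variacoes = variacoes | {v.strip() for v in it['variacoes'].split(',') if v.strip()}
--         primeiro['variacoes'] = ', '.join(sorted(variacoes))
--     return primeiro
--
--
-- def mesclar(lista1, lista2):
--     grupos = {}
--     for item in lista1 + lista2:
--         chave = item['nome'].strip().upper()
--         grupos[chave] = grupos.get(chave, []) + [item]
--     resultado = []
--     for grupo in grupos.values():
--         resultado.append(_colapsar(grupo))
--     return resultado
-- ===== Notes on version B (the rewrite author's own statement) =====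
-- stated objective: alternative
-- what changed: B replaces A's incremental fold (which re-splits, re-unions and re-sorts the accumulated variacoes string at every duplicate) with a two-pass group-then-merge: one pass groups items by normalized name into an ordered dict, then each group with more than one member is merged once by unioning all its variation sets and sorting/joining a single time; singleton groups are returned untouched.
import Mathlib
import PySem

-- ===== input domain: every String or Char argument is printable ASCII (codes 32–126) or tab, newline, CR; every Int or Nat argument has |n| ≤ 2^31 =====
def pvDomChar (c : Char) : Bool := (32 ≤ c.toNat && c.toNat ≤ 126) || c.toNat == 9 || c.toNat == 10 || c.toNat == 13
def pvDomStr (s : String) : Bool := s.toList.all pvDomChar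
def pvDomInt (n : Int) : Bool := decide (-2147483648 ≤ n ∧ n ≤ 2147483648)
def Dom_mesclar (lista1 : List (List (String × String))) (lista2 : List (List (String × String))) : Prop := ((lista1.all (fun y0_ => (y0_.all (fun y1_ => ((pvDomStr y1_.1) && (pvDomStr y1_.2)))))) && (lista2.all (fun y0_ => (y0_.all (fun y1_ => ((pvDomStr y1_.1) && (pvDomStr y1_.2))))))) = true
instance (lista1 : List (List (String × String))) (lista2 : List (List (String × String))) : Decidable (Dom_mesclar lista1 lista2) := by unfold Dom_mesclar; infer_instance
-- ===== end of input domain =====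

-- B regroups first and merges each name-group once (group-then-merge decomposition) instead of
-- re-splitting and re-sorting the accumulated string at every duplicate; like A, the Python B
-- mutates the first-seen dict of each duplicated group in place (the equivalence proved here is
-- about the return value).

-- ===== PORT A =====
-- item[k]; Pre_mesclar guarantees the key is present wherever Python reads it, so the "" default is never the result
def pvGetD (it : List (String × String)) (k : String) : String :=
  (PySem.Dict.mk it).getD k ""

-- item['nome'].strip().upper()
def pvChave (it : List (String × String)) : String :=
  PySem.Str.upper (PySem.Str.strip (pvGetD it "nome"))

-- {v.strip() for v in s.split(',') if v.strip()}
def pvParse (s : String) : PySem.Set String :=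
  PySem.Set.ofList ((((PySem.Str.split? s ",").getD []).map PySem.Str.strip).filter (fun v => v != ""))

-- ', '.join(sorted(vs))
def pvRender (vs : PySem.Set String) : String :=
  PySem.Str.join ", " (PySem.List.sorted vs (fun x => x) false)

-- item['variacoes'] = s  (in-place overwrite keeps the key's position, like Python's dict assignment)
def pvSetVar (it : List (String × String)) (s : String) : List (String × String) :=
  ((PySem.Dict.mk it).insert "variacoes" s).items

-- A's else-branch: mapa[chave]['variacoes'] = ', '.join(sorted(vars_existentes | vars_novas))
def pvMerge (first item : List (String × String)) : List (String × String) :=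
  pvSetVar first (pvRender (PySem.Set.union (pvParse (pvGetD first "variacoes")) (pvParse (pvGetD item "variacoes"))))

-- one iteration of A's loop body
def pvStepA (mapa : PySem.Dict String (List (String × String))) (item : List (String × String)) :
    PySem.Dict String (List (String × String)) :=
  let chave := pvChave item
  if mapa.contains chave = false then mapa.insert chave item
  else mapa.insert chave (pvMerge (mapa.getD chave []) item)

def mesclar (lista1 : List (List (String × String))) (lista2 : List (List (String × String))) : List (List (String × String)) :=
  ((lista1 ++ lista2).foldl pvStepA (PySem.Dict.mk [])).values

-- ===== PORT B =====
-- grupos[chave] = grupos.get(chave, []) + [item]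
def pvStepG (grupos : PySem.Dict String (List (List (String × String)))) (item : List (String × String)) :
    PySem.Dict String (List (List (String × String))) :=
  grupos.modify (pvChave item) [] (fun gr => gr ++ [item])

-- _colapsar(grupo): groups are nonempty by construction, the [] arm is unreachable
def pvColapsa (grupo : List (List (String × String))) : List (String × String) :=
  match grupo with
  | [] => []
  | primeiro :: resto =>
    if resto.isEmpty then primeiro
    else pvSetVar primeiro
      (pvRender ((primeiro :: resto).foldl
        (fun s it => PySem.Set.union s (pvParse (pvGetD it "variacoes"))) PySem.Set.empty))

def mesclar_alt (lista1 : List (List (String × String))) (lista2 : List (List (String × String))) : List (List (String × String)) :=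
  let grupos := (lista1 ++ lista2).foldl pvStepG (PySem.Dict.mk [])
  grupos.values.foldl (fun res grupo => res ++ [pvColapsa grupo]) []

-- ===== PRECONDITION & SPEC =====
-- Pre_ is exactly where the Python A returns normally: every item must have a 'nome' key
-- (item['nome'] raises KeyError otherwise) and every item whose normalized name occurs at least
-- twice must have a 'variacoes' key (the merge branch reads it for every member of such a group).
def Pre_mesclar (lista1 : List (List (String × String))) (lista2 : List (List (String × String))) : Prop :=
  (∀ it ∈ lista1 ++ lista2, (PySem.Dict.mk it).contains "nome" = true) ∧
  (∀ it ∈ lista1 ++ lista2,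
      2 ≤ (lista1 ++ lista2).countP (fun j => pvChave j == pvChave it) →
      (PySem.Dict.mk it).contains "variacoes" = true)
instance (lista1 : List (List (String × String))) (lista2 : List (List (String × String))) : Decidable (Pre_mesclar lista1 lista2) := by unfold Pre_mesclar; infer_instance

def pvWitness_mesclar : (List (List (String × String))) × (List (List (String × String))) :=
  ([[("nome", "Jon"), ("variacoes", "Jon Snow, Lord Snow")]],
   [[("nome", " jon "), ("variacoes", "Aegon")], [("nome", "Arya")]])

def Spec_mesclar (lista1 : List (List (String × String))) (lista2 : List (List (String × String))) (out : List (List (String × String))) : Prop := out = mesclar_alt lista1 lista2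
instance (lista1 : List (List (String × String))) (lista2 : List (List (String × String))) (out : List (List (String × String))) : Decidable (Spec_mesclar lista1 lista2 out) := by unfold Spec_mesclar; infer_instance

-- ===== CLAIM (what is proved, stated in full; the proofs are below) =====
def Claim_equal_mesclar : Prop := ∀ (lista1 : List (List (String × String))) (lista2 : List (List (String × String))), Dom_mesclar lista1 lista2 → Pre_mesclar lista1 lista2 → Spec_mesclar lista1 lista2 (mesclar lista1 lista2)

-- ===== LEMMAS AND PROOFS =====

-- ---- comma-splitting: a structural description of PySem.Chars.splitOn s [','] ----

def pvConsHead (c : Char) : List (List Char) → List (List Char)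
  | [] => [[c]]
  | h :: t => (c :: h) :: t

def pvSplitC : List Char → List (List Char)
  | [] => [[]]
  | c :: rest => if c = ',' then [] :: pvSplitC rest else pvConsHead c (pvSplitC rest)

def pvPrep (pre : List Char) : List (List Char) → List (List Char)
  | [] => [pre]
  | h :: t => (pre ++ h) :: t

lemma pvSplitC_ne_nil (l : List Char) : pvSplitC l ≠ [] := by
  cases l with
  | nil => simp [pvSplitC]
  | cons c rest =>
    simp only [pvSplitC]
    split
    · simp
    · cases h : pvSplitC rest <;> simp [pvConsHead]

lemma pvPrep_consHead (pre : List Char) (c : Char) (ls : List (List Char)) :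
    pvPrep pre (pvConsHead c ls) = pvPrep (pre ++ [c]) ls := by
  cases ls <;> simp [pvPrep, pvConsHead]

lemma pvPrep_nil (ls : List (List Char)) (h : ls ≠ []) : pvPrep [] ls = ls := by
  cases ls with
  | nil => exact absurd rfl h
  | cons a t => simp [pvPrep]

lemma pvGo_eq (fuel : Nat) : ∀ (l cur : List Char) (acc : List (List Char)), l.length < fuel →
    PySem.Chars.splitOn.go [','] fuel l cur acc = acc.reverse ++ pvPrep cur.reverse (pvSplitC l) := by
  induction fuel with
  | zero => intro l cur acc h; exact absurd h (Nat.not_lt_zero _)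
  | succ f ih =>
    intro l cur acc h
    cases l with
    | nil => simp [PySem.Chars.splitOn.go, pvSplitC, pvPrep]
    | cons c rest =>
      by_cases hc : c = ','
      · subst hc
        have hpre : [','].isPrefixOf (',' :: rest) = true := by simp [List.isPrefixOf]
        rw [PySem.Chars.splitOn.go, if_pos hpre]
        have hlen : (List.drop [','].length (',' :: rest)).length < f := by
          simpa using Nat.lt_of_succ_lt_succ h
        rw [ih _ _ _ hlen]
        simp only [List.length_cons, List.length_nil, List.drop_succ_cons, List.drop_zero,
          List.reverse_cons, List.reverse_nil]
        rw [pvPrep_nil _ (pvSplitC_ne_nil rest)]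
        simp [pvSplitC, pvPrep]
      · have hpre : [','].isPrefixOf (c :: rest) = false := by
          simp [List.isPrefixOf]; exact fun hh => absurd hh.symm hc
        rw [PySem.Chars.splitOn.go, if_neg (by simp [hpre])]
        have hlen : rest.length < f := by simpa using Nat.lt_of_succ_lt_succ h
        rw [ih _ _ _ hlen]
        simp [pvSplitC, hc, pvPrep_consHead]

lemma pvSplitOn_comma (l : List Char) : PySem.Chars.splitOn l [','] = pvSplitC l := by
  rw [PySem.Chars.splitOn, pvGo_eq (l.length + 1) l [] [] (Nat.lt_succ_self _)]
  simp [pvPrep_nil _ (pvSplitC_ne_nil l)]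

lemma pvSplitC_no_comma (l : List Char) (h : ',' ∉ l) : pvSplitC l = [l] := by
  induction l with
  | nil => rfl
  | cons c rest ih =>
    simp only [List.mem_cons, not_or] at h
    simp [pvSplitC, Ne.symm h.1, ih h.2, pvConsHead]

lemma pvSplitC_append (a b : List Char) (h : ',' ∉ a) :
    pvSplitC (a ++ ',' :: b) = a :: pvSplitC b := by
  induction a with
  | nil => simp [pvSplitC]
  | cons c rest ih =>
    simp only [List.mem_cons, not_or] at h
    simp [pvSplitC, Ne.symm h.1, ih h.2, pvConsHead]

lemma pvSplitC_comma_free (l : List Char) : ∀ p ∈ pvSplitC l, ',' ∉ p := by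
  induction l with
  | nil => simp [pvSplitC]
  | cons c rest ih =>
    simp only [pvSplitC]
    split
    · intro p hp
      rcases List.mem_cons.mp hp with rfl | hp
      · simp
      · exact ih p hp
    · rename_i hc
      cases hsp : pvSplitC rest with
      | nil => exact absurd hsp (pvSplitC_ne_nil rest)
      | cons h0 t =>
        intro p hp
        simp only [pvConsHead] at hp
        rcases List.mem_cons.mp hp with rfl | hp
        · intro hmem
          rcases List.mem_cons.mp hmem with rfl | hmem
          · exact hc rfl
          · exact ih h0 (hsp ▸ List.mem_cons_self) hmem
        · exact ih p (hsp ▸ List.mem_cons_of_mem h0 hp)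

-- ---- strip facts ----

lemma pvMem_of_mem_lstrip (s : List Char) (x : Char) (h : x ∈ PySem.Chars.lstrip s) : x ∈ s :=
  (List.dropWhile_sublist _).mem h

lemma pvMem_of_mem_rstrip (s : List Char) (x : Char) (h : x ∈ PySem.Chars.rstrip s) : x ∈ s := by
  unfold PySem.Chars.rstrip at h
  rw [List.mem_reverse] at h
  simpa using (List.dropWhile_sublist _).mem h

lemma pvMem_of_mem_strip (s : List Char) (x : Char) (h : x ∈ PySem.Chars.strip s) : x ∈ s :=
  pvMem_of_mem_lstrip s x (pvMem_of_mem_rstrip _ x h)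

lemma pvDropWhile_idem (p : Char → Bool) (l : List Char) :
    List.dropWhile p (List.dropWhile p l) = List.dropWhile p l := by
  induction l with
  | nil => rfl
  | cons c l ih => by_cases h : p c <;> simp [h, ih]

lemma pvDropWhile_eq_self_of_prefix (p : Char → Bool) (t u : List Char)
    (h : List.dropWhile p t = t) (hu : u <+: t) : List.dropWhile p u = u := by
  cases u with
  | nil => rfl
  | cons a u' =>
    cases t with
    | nil => exact absurd (List.eq_nil_of_prefix_nil hu) (by simp)
    | cons b t' =>
      have hab : a = b := by
        obtain ⟨v, hv⟩ := hu
        have := congrArg List.head? hv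
        simpa using this
      subst hab
      have hpb : p a = false := by
        by_contra hpb
        rw [List.dropWhile_cons, if_pos (by simpa using hpb)] at h
        have := List.length_dropWhile_le p t'
        have := congrArg List.length h
        simp at this
        omega
      simp [hpb]

lemma pvLstrip_eq_self_of_lstrip (t : List Char) (h : PySem.Chars.lstrip t = t) :
    PySem.Chars.lstrip (PySem.Chars.rstrip t) = PySem.Chars.rstrip t := by
  unfold PySem.Chars.lstrip at *
  refine pvDropWhile_eq_self_of_prefix _ t _ h ?_
  unfold PySem.Chars.rstrip
  have := List.dropWhile_suffix (l := t.reverse) PySem.Chars.isspace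
  obtain ⟨v, hv⟩ := this
  exact ⟨v.reverse, by rw [← List.reverse_append, hv, List.reverse_reverse]⟩

lemma pvStrip_idem (s : List Char) : PySem.Chars.strip (PySem.Chars.strip s) = PySem.Chars.strip s := by
  unfold PySem.Chars.strip
  have h1 : PySem.Chars.lstrip (PySem.Chars.lstrip s) = PySem.Chars.lstrip s :=
    pvDropWhile_idem _ _
  rw [pvLstrip_eq_self_of_lstrip _ h1]
  unfold PySem.Chars.rstrip
  rw [List.reverse_reverse, pvDropWhile_idem]

lemma pvStrip_cons_space (s : List Char) : PySem.Chars.strip (' ' :: s) = PySem.Chars.strip s := by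
  unfold PySem.Chars.strip PySem.Chars.lstrip
  rw [List.dropWhile_cons, if_pos (by decide)]

-- ---- "good" tokens: what the set comprehension produces ----

def pvGoodC (p : List Char) : Prop := p ≠ [] ∧ PySem.Chars.strip p = p ∧ ',' ∉ p

-- join-then-split roundtrip at the character-list level
lemma pvStripNil : PySem.Chars.strip ([] : List Char) = [] := rfl

lemma pvParseC_join (L : List (List Char)) (h : ∀ p ∈ L, pvGoodC p) :
    ((pvSplitC (PySem.Chars.join [',', ' '] L)).map PySem.Chars.strip).filter (fun v => v != []) = L := by
  induction L with
  | nil => simp [PySem.Chars.join, List.intercalate, pvSplitC, pvStripNil]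
  | cons v L' ih =>
    obtain ⟨hv1, hv2, hv3⟩ := h v List.mem_cons_self
    cases L' with
    | nil =>
      have : PySem.Chars.join [',', ' '] [v] = v := by simp [PySem.Chars.join, List.intercalate]
      rw [this, pvSplitC_no_comma v hv3]
      simp [hv2, hv1]
    | cons w L'' =>
      have hjoin : PySem.Chars.join [',', ' '] (v :: w :: L'') =
          v ++ ',' :: (' ' :: PySem.Chars.join [',', ' '] (w :: L'')) := by
        simp [PySem.Chars.join, List.intercalate, List.intersperse]
      rw [hjoin, pvSplitC_append v _ hv3]
      have hrest := ih (fun p hp => h p (List.mem_cons_of_mem v hp))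
      cases hX : pvSplitC (PySem.Chars.join [',', ' '] (w :: L'')) with
      | nil => exact absurd hX (pvSplitC_ne_nil _)
      | cons h0 t =>
        have hsp : pvSplitC (' ' :: PySem.Chars.join [',', ' '] (w :: L'')) = (' ' :: h0) :: t := by
          simp [pvSplitC, hX, pvConsHead]
        rw [hX] at hrest
        have hx : ((pvSplitC (' ' :: PySem.Chars.join [',', ' '] (w :: L''))).map
            PySem.Chars.strip).filter (fun v => v != []) = w :: L'' := by
          rw [hsp, List.map_cons, pvStrip_cons_space, ← List.map_cons]
          exact hrest
        rw [List.map_cons, List.filter_cons, hv2, if_pos (by simpa using hv1), hx]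

-- ===== string-level versions =====

def pvGood (v : String) : Prop := v ≠ "" ∧ PySem.Str.strip v = v ∧ ',' ∉ v.toList

lemma pvOfList_bne_empty (q : List Char) : (String.ofList q != "") = (q != []) := by
  by_cases hq : q = []
  · subst hq; rfl
  · have hne : String.ofList q ≠ "" := by
      intro hcon; apply hq
      have := congrArg String.toList hcon
      simpa using this
    have h1 : (String.ofList q != "") = true := by simpa [bne_iff_ne] using hne
    have h2 : (q != []) = true := by simpa [bne_iff_ne] using hq
    rw [h1, h2]

lemma pvParse_eq (s : String) :
    pvParse s = PySem.Set.ofList ((((pvSplitC s.toList).map PySem.Chars.strip).filter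
      (fun v => v != [])).map String.ofList) := by
  unfold pvParse
  have h1 : PySem.Str.split? s "," = some ((pvSplitC s.toList).map String.ofList) := by
    have hsep : ("," : String).toList = [','] := rfl
    simp [PySem.Str.split?, PySem.Chars.split?, hsep, pvSplitOn_comma]
  rw [h1]
  have hcomp : PySem.Str.strip ∘ String.ofList = String.ofList ∘ PySem.Chars.strip := by
    funext p
    simp [PySem.Str.strip, String.toList_ofList, Function.comp]
  congr 1
  rw [Option.getD_some, List.map_map, hcomp, ← List.map_map, List.filter_map]
  congr 1
  apply List.filter_congr
  intro q _
  exact pvOfList_bne_empty q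

lemma pvParse_good (s : String) : ∀ v ∈ pvParse s, pvGood v := by
  intro v hv
  rw [pvParse_eq] at hv
  rw [PySem.Set.mem_ofList] at hv
  obtain ⟨q, hq, rfl⟩ := List.mem_map.mp hv
  have hq' := List.mem_filter.mp hq
  obtain ⟨p', hp', rfl⟩ := List.mem_map.mp hq'.1
  have hqe : PySem.Chars.strip p' ≠ [] := by simpa using hq'.2
  refine ⟨?_, ?_, ?_⟩
  · intro hcon; apply hqe
    have := congrArg String.toList hcon
    simpa using this
  · simp [PySem.Str.strip, String.toList_ofList, pvStrip_idem]
  · rw [String.toList_ofList]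
    intro hmem
    exact pvSplitC_comma_free s.toList p' hp' (pvMem_of_mem_strip _ _ hmem)

lemma pvParse_render (S : List String) (hnd : S.Nodup) (hg : ∀ v ∈ S, pvGood v) :
    pvParse (pvRender S) = PySem.List.sorted S (fun x => x) false := by
  set L := PySem.List.sorted S (fun x => x) false with hL
  have hperm : L.Perm S := PySem.List.sorted_perm S (fun x => x) false
  have hnodup : L.Nodup := hperm.symm.nodup hnd
  have hgoodL : ∀ v ∈ L, pvGood v := fun v hv => hg v (hperm.mem_iff.mp hv)
  unfold pvRender
  rw [pvParse_eq]
  have hsep : (", " : String).toList = [',', ' '] := rfl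
  have htl : (PySem.Str.join ", " L).toList = PySem.Chars.join [',', ' '] (L.map String.toList) := by
    rw [PySem.Str.toList_join, hsep]
  rw [← hL, htl]
  have hgoodC : ∀ p ∈ L.map String.toList, pvGoodC p := by
    intro p hp
    obtain ⟨v, hv, rfl⟩ := List.mem_map.mp hp
    obtain ⟨h1, h2, h3⟩ := hgoodL v hv
    refine ⟨?_, ?_, h3⟩
    · intro hcon; apply h1
      have := congrArg String.ofList hcon
      simpa [String.ofList_toList] using this
    · rw [← PySem.Str.toList_strip, h2]
  rw [pvParseC_join _ hgoodC, List.map_map]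
  have : String.ofList ∘ String.toList = id := by
    funext v; simp [String.ofList_toList, Function.comp]
  rw [this, List.map_id]
  exact PySem.Set.ofList_eq_self_of_nodup L hnodup

lemma pvRender_congr (S T : List String) (hS : S.Nodup) (hT : T.Nodup)
    (h : ∀ x, x ∈ S ↔ x ∈ T) : pvRender S = pvRender T := by
  unfold pvRender
  rw [PySem.List.sorted_eq_sorted_of_perm S T (fun x => x) (fun a b hab => hab)
    ((List.perm_ext_iff_of_nodup hS hT).mpr h)]

-- ---- collapse: A's incremental merge over a group equals B's one-shot merge ----

lemma pvVar_setVar (it : List (String × String)) (s : String) :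
    pvGetD (pvSetVar it s) "variacoes" = s := by
  show ((PySem.Dict.mk it).insert "variacoes" s).getD "variacoes" "" = s
  simp

lemma pvSetVar_setVar (it : List (String × String)) (a b : String) :
    pvSetVar (pvSetVar it a) b = pvSetVar it b := by
  show (((PySem.Dict.mk it).insert "variacoes" a).insert "variacoes" b).items = _
  rw [PySem.Dict.insert_insert_self]
  rfl

def pvStepU (s : PySem.Set String) (it : List (String × String)) : PySem.Set String :=
  PySem.Set.union s (pvParse (pvGetD it "variacoes"))

lemma pvStepU_props (r : List (List (String × String))) (s : PySem.Set String)
    (h : s.Nodup ∧ ∀ v ∈ s, pvGood v) :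
    (r.foldl pvStepU s).Nodup ∧ ∀ v ∈ r.foldl pvStepU s, pvGood v := by
  induction r generalizing s with
  | nil => exact h
  | cons it r ih =>
    rw [List.foldl_cons]
    refine ih _ ⟨PySem.Set.nodup_union _ _ h.1, ?_⟩
    intro v hv
    have := (PySem.Set.mem_update s _ v).mp (by simpa [pvStepU, PySem.Set.union] using hv)
    rcases this with hv' | hv'
    · exact h.2 v hv'
    · exact pvParse_good _ v hv'

lemma pvEmpty_union_parse (t : String) :
    PySem.Set.union PySem.Set.empty (pvParse t) = pvParse t := by
  show PySem.Set.update [] (pvParse t) = pvParse t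
  rw [PySem.Set.update_nil_left]
  unfold pvParse
  rw [PySem.Set.ofList_eq_self_of_nodup _ (PySem.Set.nodup_ofList _)]

set_option maxHeartbeats 1600000 in
lemma pvCollapse_merge (p : List (String × String)) (r : List (List (String × String))) (hr : r ≠ []) :
    r.foldl pvMerge p =
      pvSetVar p (pvRender (r.foldl pvStepU (PySem.Set.union PySem.Set.empty (pvParse (pvGetD p "variacoes"))))) := by
  induction r using List.reverseRecOn with
  | nil => exact absurd rfl hr
  | append_singleton r x ih =>
    rw [List.foldl_append, List.foldl_append]
    by_cases hr0 : r = []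
    · subst hr0
      simp only [List.foldl_nil, List.foldl_cons]
      rw [pvEmpty_union_parse]
      rfl
    · rw [ih hr0]
      set S0 := PySem.Set.union PySem.Set.empty (pvParse (pvGetD p "variacoes")) with hS0
      have hS0p : S0.Nodup ∧ ∀ v ∈ S0, pvGood v := by
        rw [hS0, pvEmpty_union_parse]
        exact ⟨PySem.Set.nodup_ofList _, pvParse_good _⟩
      have hU := pvStepU_props r S0 hS0p
      set U := r.foldl pvStepU S0 with hUdef
      have hsortnd : (PySem.List.sorted U (fun x => x) false).Nodup :=
        (PySem.List.sorted_perm U (fun x => x) false).symm.nodup hU.1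
      simp only [List.foldl_cons, List.foldl_nil, pvMerge]
      rw [pvVar_setVar, pvSetVar_setVar, pvParse_render U hU.1 hU.2]
      congr 1
      apply pvRender_congr
      · exact PySem.Set.nodup_union _ _ hsortnd
      · show (PySem.Set.union U _).Nodup
        exact PySem.Set.nodup_union _ _ hU.1
      · intro y
        show y ∈ PySem.Set.update _ _ ↔ y ∈ PySem.Set.update _ _
        rw [PySem.Set.mem_update, PySem.Set.mem_update, PySem.List.mem_sorted]

lemma pvColapsa_eq (p : List (String × String)) (r : List (List (String × String))) :
    pvColapsa (p :: r) = r.foldl pvMerge p := by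
  cases r with
  | nil => simp [pvColapsa]
  | cons y r' =>
    rw [pvCollapse_merge p (y :: r') (by simp)]
    simp only [pvColapsa, List.isEmpty_cons, Bool.false_eq_true, if_false, List.foldl_cons]
    rfl

-- ---- dict plumbing: A's mapa is B's grupos with every group collapsed ----

def pvRel (mapa : PySem.Dict String (List (String × String)))
    (grupos : PySem.Dict String (List (List (String × String)))) : Prop :=
  mapa.items = grupos.items.map (fun pr => (pr.1, pvColapsa pr.2)) ∧
  (∀ pr ∈ grupos.items, pr.2 ≠ []) ∧ grupos.keys.Nodup

lemma pvRel_step (mapa : PySem.Dict String (List (String × String)))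
    (grupos : PySem.Dict String (List (List (String × String))))
    (item : List (String × String)) (h : pvRel mapa grupos) :
    pvRel (pvStepA mapa item) (pvStepG grupos item) := by
  obtain ⟨hit, hne, hnd⟩ := h
  set c := pvChave item with hc
  set f : String × List (List (String × String)) → String × List (String × String) :=
    fun pr => (pr.1, pvColapsa pr.2) with hf
  have hcont : mapa.contains c = grupos.contains c := by
    simp only [PySem.Dict.contains, hit, List.any_map]
    rfl
  have hstepG : pvStepG grupos item = grupos.insert c (grupos.getD c [] ++ [item]) := rfl
  by_cases hgc : grupos.contains c = true
  · -- key already present: both sides overwrite in place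
    have hmc : mapa.contains c = true := hcont.trans hgc
    have hfind : ∃ pr ∈ grupos.items, pr.1 == c := by
      simpa [PySem.Dict.contains, List.any_eq_true] using hgc
    obtain ⟨pr0, hpr0, hpr0c⟩ := hfind
    obtain ⟨pr, hfindsome⟩ : ∃ pr, List.find? (fun p => p.1 == c) grupos.items = some pr := by
      cases hfq : List.find? (fun p => p.1 == c) grupos.items with
      | none => exact absurd hpr0c (List.find?_eq_none.mp hfq pr0 hpr0)
      | some pr => exact ⟨pr, rfl⟩
    have hgget : grupos.get? c = some pr.2 := by
      simp [PySem.Dict.get?, hfindsome]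
    have hgD : grupos.getD c [] = pr.2 := by simp [PySem.Dict.getD, hgget]
    have hmget : mapa.get? c = some (pvColapsa pr.2) := by
      simp only [PySem.Dict.get?, hit, hf, List.find?_map]
      have : List.find? ((fun p => p.1 == c) ∘ fun pr => (pr.1, pvColapsa pr.2)) grupos.items =
          List.find? (fun p => p.1 == c) grupos.items := rfl
      rw [this, hfindsome]
      rfl
    have hmD : mapa.getD c [] = pvColapsa pr.2 := by simp [PySem.Dict.getD, hmget]
    have hgne : pr.2 ≠ [] := hne pr (List.mem_of_find?_eq_some hfindsome)
    obtain ⟨g0, r0, hg⟩ : ∃ g0 r0, pr.2 = g0 :: r0 := by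
      cases hgx : pr.2 with
      | nil => exact absurd hgx hgne
      | cons a b => exact ⟨a, b, rfl⟩
    have hkey : pvMerge (pvColapsa pr.2) item = pvColapsa (pr.2 ++ [item]) := by
      rw [hg, List.cons_append, pvColapsa_eq, pvColapsa_eq, List.foldl_append]
      rfl
    refine ⟨?_, ?_, ?_⟩
    · show (pvStepA mapa item).items = _
      simp only [pvStepA, ← hc, hmc, Bool.true_eq_false, if_false]
      simp only [hstepG, PySem.Dict.insert, hmc, hgc, if_true, hit, List.map_map]
      apply List.map_congr_left
      intro q hq
      by_cases hq1 : q.1 = c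
      · simp only [Function.comp, hf, hq1, beq_self_eq_true, if_true]
        rw [hmD, hgD, hkey]
      · simp [Function.comp, hf, hq1]
    · intro pr' hpr'
      simp only [hstepG, PySem.Dict.insert, hgc, if_true] at hpr'
      obtain ⟨q, hq, rfl⟩ := List.mem_map.mp hpr'
      by_cases hq1 : q.1 == c
      · simp [hq1]
      · simp only [hq1, Bool.false_eq_true, if_false]
        exact hne q hq
    · rw [hstepG]
      exact PySem.Dict.nodup_keys_insert _ _ _ hnd
  · -- new key: both sides append
    have hgc' : grupos.contains c = false := by simpa using hgc
    have hmc : mapa.contains c = false := hcont.trans hgc'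
    have hgD : grupos.getD c [] = [] := by
      have hfn : List.find? (fun p => p.1 == c) grupos.items = none := by
        rw [List.find?_eq_none]
        intro x hx hcon
        have hct : grupos.contains c = true := by
          unfold PySem.Dict.contains
          rw [List.any_eq_true]
          exact ⟨x, hx, hcon⟩
        rw [hct] at hgc'
        exact Bool.noConfusion hgc'
      simp [PySem.Dict.getD, PySem.Dict.get?, hfn]
    refine ⟨?_, ?_, ?_⟩
    · show (pvStepA mapa item).items = _
      simp only [pvStepA, ← hc, hmc, if_true]
      simp only [hstepG, PySem.Dict.insert, hmc, hgc', Bool.false_eq_true, if_false, hit, hgD]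
      simp [hf, pvColapsa]
    · intro pr' hpr'
      simp only [hstepG, PySem.Dict.insert, hgc', Bool.false_eq_true, if_false, hgD] at hpr'
      rcases List.mem_append.mp hpr' with hmem | hmem
      · exact hne pr' hmem
      · simp only [List.mem_singleton] at hmem
        subst hmem
        simp
    · rw [hstepG]
      exact PySem.Dict.nodup_keys_insert _ _ _ hnd

lemma pvRel_foldl (xs : List (List (String × String)))
    (mapa : PySem.Dict String (List (String × String)))
    (grupos : PySem.Dict String (List (List (String × String)))) (h : pvRel mapa grupos) :
    pvRel (xs.foldl pvStepA mapa) (xs.foldl pvStepG grupos) := by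
  induction xs generalizing mapa grupos with
  | nil => exact h
  | cons x xs ih => exact ih _ _ (pvRel_step _ _ _ h)

-- ===== VERDICT (by name: the statement is the Claim_ definition above) =====
theorem mesclar_spec : Claim_equal_mesclar := by
  intro lista1 lista2 _ _
  unfold Spec_mesclar mesclar mesclar_alt
  have h := pvRel_foldl (lista1 ++ lista2) (PySem.Dict.mk []) (PySem.Dict.mk [])
    ⟨by simp, by simp, by simp [PySem.Dict.keys]⟩
  rw [PySem.List.foldl_append_singleton_eq_map]
  simp only [PySem.Dict.values, h.1, List.map_map, List.nil_append]
  rfl
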